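-- pv_equiv track=rewrite | github.com/Oneplus/smalltools | smalltools/utils/word2tags.py | BIESstyle
-- ===== SOURCE A (Python) =====
-- def BIESstyle(word, encoding=None):
--     if encoding is not None:
--         word = word.decode(encoding)
--
--     ret = []
--     if len(word) == 1:
--         ret.append("S")
--     else:
--         for i, c in enumerate(word):
--             if i == 0:
--                 ret.append("B")
--             elif i == len(word) - 1:
--                 ret.append("E")
--             else:
--                 ret.append("I")
--     return ret
-- ===== SOURCE B (Python) =====
-- def BIESstyle(word, encoding=None):
--     if encoding is not None:
--         word = word.decode(encoding)
--     n = len(word)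
--     if n == 0:
--         return []
--     if n == 1:
--         return ["S"]
--     return ["B"] + ["I"] * (n - 2) + ["E"]
-- ===== Notes on version B (the rewrite author's own statement) =====
-- stated objective: simpler
-- what changed: Replaces the indexed per-character enumerate loop with a direct length-based construction of the three tag runs ['B'] + ['I']*(n-2) + ['E'].
import Mathlib
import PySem

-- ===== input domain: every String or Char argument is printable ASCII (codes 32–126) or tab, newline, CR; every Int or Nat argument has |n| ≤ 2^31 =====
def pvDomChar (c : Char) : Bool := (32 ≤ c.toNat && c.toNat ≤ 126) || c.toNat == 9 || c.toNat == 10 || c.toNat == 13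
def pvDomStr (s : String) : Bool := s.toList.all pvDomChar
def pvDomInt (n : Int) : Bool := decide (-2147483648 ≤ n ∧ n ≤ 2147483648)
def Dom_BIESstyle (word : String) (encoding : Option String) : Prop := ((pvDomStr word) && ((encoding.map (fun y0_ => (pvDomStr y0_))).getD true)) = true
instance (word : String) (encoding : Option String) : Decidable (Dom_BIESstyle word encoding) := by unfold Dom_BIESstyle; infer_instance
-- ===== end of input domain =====

-- B replaces A's indexed per-character loop by building the tag runs directly from the length (simpler decomposition, same cost).

-- ===== PORT A =====
def BIESstyle (word : String) (encoding : Option String) : List String :=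
  match encoding with
  | some _ => []  -- Python: word.decode(encoding) raises AttributeError on str; excluded by Pre_
  | none =>
    let cs := word.toList
    if cs.length == 1 then ["S"]
    else
      (PySem.List.enumerate cs).foldl
        (fun ret ic =>
          if ic.1 == 0 then ret ++ ["B"]
          else if ic.1 == (cs.length : Int) - 1 then ret ++ ["E"]
          else ret ++ ["I"]) []

-- ===== PORT B =====
def BIESstyle_alt (word : String) (encoding : Option String) : List String :=
  match encoding with
  | some _ => []  -- Python: word.decode(encoding) raises AttributeError on str; excluded by Pre_
  | none =>
    let n := word.toList.length
    if n = 0 then []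
    else if n = 1 then ["S"]
    else "B" :: (List.replicate (n - 2) "I" ++ ["E"])

-- ===== PRECONDITION & SPEC =====
-- Pre_ excludes encoding ≠ None: there Python's str.decode raises AttributeError in both A and B.
def Pre_BIESstyle (word : String) (encoding : Option String) : Prop := encoding = none
instance (word : String) (encoding : Option String) : Decidable (Pre_BIESstyle word encoding) := by unfold Pre_BIESstyle; infer_instance
def pvWitness_BIESstyle : String × Option String := ("word", none)

def Spec_BIESstyle (word : String) (encoding : Option String) (out : List String) : Prop := out = BIESstyle_alt word encoding
instance (word : String) (encoding : Option String) (out : List String) : Decidable (Spec_BIESstyle word encoding out) := by unfold Spec_BIESstyle; infer_instance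

-- ===== CLAIM (what is proved, stated in full; the proofs are below) =====
def Claim_equal_BIESstyle : Prop := ∀ (word : String) (encoding : Option String), Dom_BIESstyle word encoding → Pre_BIESstyle word encoding → Spec_BIESstyle word encoding (BIESstyle word encoding)

-- ===== LEMMAS AND PROOFS =====

-- the loop body only appends: the fold is acc ++ a map of the tags
theorem foldl_tag (l : List (Int × Char)) (acc : List String) (n : Int) :
    l.foldl
      (fun ret ic =>
        if ic.1 == 0 then ret ++ ["B"]
        else if ic.1 == n then ret ++ ["E"]
        else ret ++ ["I"]) acc
    = acc ++ l.map (fun ic => if ic.1 == 0 then "B" else if ic.1 == n then "E" else "I") := by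
  induction l generalizing acc with
  | nil => simp
  | cons x xs ih =>
    simp only [List.foldl_cons, List.map_cons]
    split_ifs <;> rw [ih] <;> simp

theorem map_BI (m : Nat) :
    (List.range (m + 1)).map (fun k : Nat => if (k : Int) == 0 then "B" else "I")
    = "B" :: List.replicate m "I" := by
  induction m with
  | zero => decide
  | succ m ih =>
    rw [List.range_succ, List.map_append, ih]
    have h : ¬ (((m + 1 : Nat)) : Int) = 0 := by push_cast; omega
    simp [List.replicate_succ']

theorem map_tag_range (m : Nat) :
    (List.range (m + 2)).map
      (fun k : Nat => if (k : Int) == 0 then "B" else if (k : Int) == (m : Int) + 1 then "E" else "I")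
    = "B" :: (List.replicate m "I" ++ ["E"]) := by
  have hr : m + 2 = (m + 1) + 1 := by omega
  rw [hr, List.range_succ, List.map_append]
  have h1 : (List.range (m + 1)).map
      (fun k : Nat => if (k : Int) == 0 then "B" else if (k : Int) == (m : Int) + 1 then "E" else "I")
      = (List.range (m + 1)).map (fun k : Nat => if (k : Int) == 0 then "B" else "I") := by
    apply List.map_congr_left
    intro k hk
    have hk' : k < m + 1 := List.mem_range.mp hk
    have hne : ¬ ((k : Int) == (m : Int) + 1) = true := by
      simp only [beq_iff_eq]; omega
    by_cases h0 : ((k : Int) == 0) = true <;> simp [h0, hne]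
  have h2 : [m + 1].map
      (fun k : Nat => if (k : Int) == 0 then "B" else if (k : Int) == (m : Int) + 1 then "E" else "I")
      = ["E"] := by
    have hne0 : ¬ (((m + 1 : Nat)) : Int) = 0 := by push_cast; omega
    have heq : (((m + 1 : Nat)) : Int) = (m : Int) + 1 := by push_cast; ring
    simp [heq]
  rw [h1, map_BI, h2]
  simp [List.cons_append]

-- ===== VERDICT (by name: the statement is the Claim_ definition above) =====
theorem BIESstyle_spec : Claim_equal_BIESstyle := by
  intro word encoding _ hpre
  unfold Pre_BIESstyle at hpre
  subst hpre
  unfold Spec_BIESstyle BIESstyle BIESstyle_alt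
  simp only
  set cs := word.toList with hcs
  by_cases h1 : cs.length = 1
  · simp [h1]
  · by_cases h0 : cs.length = 0
    · have : cs = [] := List.length_eq_zero_iff.mp h0
      simp [this]
    · -- length ≥ 2
      have h2 : 2 ≤ cs.length := by omega
      obtain ⟨m, hm⟩ : ∃ m, cs.length = m + 2 := ⟨cs.length - 2, by omega⟩
      have hne1 : (cs.length == 1) = false := by simp [h1]
      have hne0 : ¬ cs.length = 0 := h0
      simp only [hne1, Bool.false_eq_true, if_false, h0, if_false, h1, if_false]
      rw [foldl_tag (n := (cs.length : Int) - 1)]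
      rw [PySem.List.enumerate_eq_map_pyRange (d := 'a')]
      rw [List.map_map]
      rw [PySem.List.pyRange_one]
      rw [List.map_map]
      simp only [PySem.List.len_eq]
      have : ((cs.length : Int) - 0).toNat = m + 2 := by omega
      rw [this]
      have hmap : (List.range (m + 2)).map
          (((fun ic : Int × Char => if ic.1 == 0 then "B" else if ic.1 == (cs.length : Int) - 1 then "E" else "I")
            ∘ (fun j => (j, PySem.List.pyGetD cs j 'a'))) ∘ (fun k : Nat => (0 : Int) + k))
          = (List.range (m + 2)).map
          (fun k : Nat => if (k : Int) == 0 then "B" else if (k : Int) == (m : Int) + 1 then "E" else "I") := by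
        apply List.map_congr_left
        intro k _
        simp only [Function.comp]
        have : (cs.length : Int) - 1 = (m : Int) + 1 := by omega
        rw [this]
        norm_num
      rw [hmap, map_tag_range]
      have h3 : cs.length - 2 = m := by omega
      rw [h3, List.nil_append]
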